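-- pv_equiv track=rewrite | github.com/AdibaOrz/FLISM | models/AutoFed/generative_utils.py | generate_model_dict
-- ===== SOURCE A (Python) =====
-- def generate_model_dict(num_modalities):
--     model_dict = {}
--     index = 0
--     for i in range(num_modalities):
--         for j in range(num_modalities):
--             if i != j:
--                 key = f'from_{i}_to_{j}'
--                 model_dict[index] = key
--                 index += 1
--     return model_dict
-- ===== SOURCE B (Python) =====
-- def generate_model_dict(num_modalities):
--     n = num_modalities
--     if n < 2:
--         return {}
--     model_dict = {}
--     for index in range(n * (n - 1)):
--         i = index // (n - 1)
--         off = index % (n - 1)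
--         j = off if off < i else off + 1
--         model_dict[index] = f'from_{i}_to_{j}'
--     return model_dict
-- ===== Notes on version B (the rewrite author's own statement) =====
-- stated objective: alternative
-- what changed: The nested i/j loops with an i!=j skip and a running counter are replaced by a single flat loop over range(n*(n-1)) that recovers each pair's coordinates from the index by floor-division/modulo (with an off<i adjustment to skip the diagonal).
import Mathlib
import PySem

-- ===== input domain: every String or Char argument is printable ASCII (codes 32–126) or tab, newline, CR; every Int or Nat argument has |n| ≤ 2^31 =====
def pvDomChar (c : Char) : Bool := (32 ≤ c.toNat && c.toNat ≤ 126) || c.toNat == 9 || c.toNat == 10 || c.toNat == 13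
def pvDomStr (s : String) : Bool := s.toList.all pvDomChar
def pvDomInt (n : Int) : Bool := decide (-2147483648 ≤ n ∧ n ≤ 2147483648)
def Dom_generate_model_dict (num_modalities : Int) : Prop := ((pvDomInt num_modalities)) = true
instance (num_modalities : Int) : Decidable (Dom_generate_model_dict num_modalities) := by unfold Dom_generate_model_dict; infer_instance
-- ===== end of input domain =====

-- B replaces A's nested i/j loops (with the i≠j skip) by one flat loop whose pair coordinates
-- are recovered from the running index by floor-division/modulo (alternative decomposition, same cost).

-- ===== PORT A =====
def generate_model_dict (num_modalities : Int) : List (Int × String) :=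
  let st := (PySem.List.pyRange 0 num_modalities 1).foldl (fun st i =>
    (PySem.List.pyRange 0 num_modalities 1).foldl (fun st j =>
      if i ≠ j then
        let key := "from_" ++ PySem.Int.toStr i ++ "_to_" ++ PySem.Int.toStr j
        (st.1.insert st.2 key, st.2 + 1)
      else st) st) ((PySem.Dict.empty : PySem.Dict Int String), (0 : Int))
  st.1.items

-- ===== PORT B =====
def generate_model_dict_alt (num_modalities : Int) : List (Int × String) :=
  let n := num_modalities
  if n < 2 then []
  else
    ((PySem.List.pyRange 0 (n * (n - 1)) 1).foldl (fun d index =>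
        let i := PySem.Int.floordiv index (n - 1)
        let off := PySem.Int.mod index (n - 1)
        let j := if off < i then off else off + 1
        d.insert index ("from_" ++ PySem.Int.toStr i ++ "_to_" ++ PySem.Int.toStr j))
      (PySem.Dict.empty : PySem.Dict Int String)).items

-- ===== PRECONDITION & SPEC =====
def Spec_generate_model_dict (num_modalities : Int) (out : List (Int × String)) : Prop := out = generate_model_dict_alt num_modalities
instance (num_modalities : Int) (out : List (Int × String)) : Decidable (Spec_generate_model_dict num_modalities out) := by unfold Spec_generate_model_dict; infer_instance

-- ===== CLAIM (what is proved, stated in full; the proofs are below) =====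
def Claim_equal_generate_model_dict : Prop := ∀ (num_modalities : Int), Dom_generate_model_dict num_modalities → Spec_generate_model_dict num_modalities (generate_model_dict num_modalities)

-- ===== LEMMAS AND PROOFS =====

-- the string written for the pair (i, j)
def pvKey (i j : Int) : String := "from_" ++ PySem.Int.toStr i ++ "_to_" ++ PySem.Int.toStr j

-- the inner j-list A keeps for a fixed i, at Nat level
def pvInner (N i : Nat) : List Nat := (List.range N).filter (fun t => decide ¬(i = t))


theorem pvInnerEq (N i : Nat) (h : i < N) :
    pvInner N i = List.range i ++ (List.range (N - 1 - i)).map (fun q => i + 1 + q) := by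
  unfold pvInner
  have hN : N = (i + 1) + (N - 1 - i) := by omega
  rw [hN, List.range_add, List.range_succ, List.filter_append, List.filter_append]
  have h1 : (List.range i).filter (fun t => decide ¬(i = t)) = List.range i := by
    apply List.filter_eq_self.mpr
    intro a ha
    simp only [List.mem_range] at ha
    simp; omega
  have h2 : ([i] : List Nat).filter (fun t => decide ¬(i = t)) = [] := by simp
  have h3 : ((List.range (N - 1 - i)).map (fun q => i + 1 + q)).filter (fun t => decide ¬(i = t))
      = (List.range (N - 1 - i)).map (fun q => i + 1 + q) := by
    apply List.filter_eq_self.mpr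
    intro a ha
    simp only [List.mem_map] at ha
    obtain ⟨q, _, rfl⟩ := ha
    simp; omega
  rw [h1, h2, h3]; simp
theorem pvInnerLen (N i : Nat) (h : i < N) : (pvInner N i).length = N - 1 := by
  rw [pvInnerEq N i h]; simp; omega

theorem pvInnerGet (N i r : Nat) (h : i < N) (hr : r < N - 1) :
    (pvInner N i)[r]? = some (if r < i then r else r + 1) := by
  rw [pvInnerEq N i h]
  by_cases hri : r < i
  · rw [List.getElem?_append_left (by simpa)]
    simp [hri]
  · rw [List.getElem?_append_right (by simp; omega)]
    simp only [List.length_range]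
    rw [List.getElem?_map, List.getElem?_range (by omega)]
    simp [hri]; omega
theorem pvFlatMapGet {α : Type} (g : Nat → List α) (m : Nat)
    (N : Nat) (hg : ∀ i < N, (g i).length = m) :
    ((List.range N).flatMap g).length = N * m
      ∧ ∀ k, k < N * m → ((List.range N).flatMap g)[k]? = (g (k / m))[k % m]? := by
  induction N with
  | zero => simp
  | succ n ih =>
    obtain ⟨ihlen, ihget⟩ := ih (fun i hi => hg i (by omega))
    rw [List.range_succ, List.flatMap_append]
    constructor
    · simp [ihlen, hg n (by omega)]
      ring
    · intro k hk
      by_cases hkn : k < n * m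
      · rw [List.getElem?_append_left (by rw [ihlen]; exact hkn)]
        exact ihget k hkn
      · have hk' : k < n * m + m := by rw [Nat.succ_mul] at hk; exact hk
        have hm : 0 < m := by by_contra hm0; omega
        rw [List.getElem?_append_right (by rw [ihlen]; omega)]
        have hdiv : k / m = n := by
          apply Nat.div_eq_of_lt_le (by omega) (by rw [Nat.succ_mul]; omega)
        have hmod : k % m = k - n * m := by
          conv_lhs => rw [← Nat.sub_add_cancel (le_of_not_gt hkn), Nat.add_mul_mod_self_right]
          rw [Nat.mod_eq_of_lt (by omega)]
        rw [ihlen, hdiv, hmod]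
        simp
theorem pvCounterLoop {α : Type} (f : α → String) (l : List α)
    (d : PySem.Dict Int String) (c : Int) (h : ∀ k ∈ d.keys, k < c) :
    l.foldl (fun st x => (st.1.insert st.2 (f x), st.2 + 1)) (d, c)
      = (PySem.Dict.mk (d.items ++ PySem.List.enumerate (l.map f) c), c + l.length) := by
  induction l generalizing d c with
  | nil => simp [PySem.List.enumerate_nil]
  | cons x l ih =>
    have hc : d.contains c = false := by
      by_contra hcc
      have := (PySem.Dict.contains_iff_mem_keys d c).mp (by simpa using hcc)
      exact absurd (h c this) (lt_irrefl c)
    have hkeys : (d.insert c (f x)).keys = d.keys ++ [c] :=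
      PySem.Dict.keys_insert_of_not_contains d (f x) hc
    have h' : ∀ k ∈ (d.insert c (f x)).keys, k < c + 1 := by
      intro k hk
      rw [hkeys] at hk
      rcases List.mem_append.mp hk with hk | hk
      · exact lt_trans (h k hk) (by omega)
      · simp at hk; omega
    simp only [List.foldl_cons]
    rw [ih (d.insert c (f x)) (c + 1) h']
    rw [PySem.Dict.items_insert_of_not_contains d (f x) hc]
    simp [PySem.List.enumerate_cons]
    omega
theorem pvMkKeysBound (d : PySem.Dict Int String) (L : List String) (c : Int)
    (h : ∀ k ∈ d.keys, k < c) :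
    ∀ k ∈ (PySem.Dict.mk (d.items ++ PySem.List.enumerate L c)).keys, k < c + L.length := by
  intro k hk
  simp only [PySem.Dict.keys, List.map_append, List.mem_append] at hk
  rcases hk with hk | hk
  · have := h k hk
    have hL : (0:Int) ≤ L.length := by positivity
    omega
  · rw [show (List.map Prod.fst (PySem.List.enumerate L c))
        = (PySem.List.enumerate L c).map (·.1) from rfl,
      PySem.List.map_fst_enumerate] at hk
    exact ((PySem.List.mem_pyRange_one).mp hk).2

theorem pvOuter (n : Int) (is : List Int) (d : PySem.Dict Int String) (c : Int)
    (h : ∀ k ∈ d.keys, k < c) :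
    is.foldl (fun st i =>
        (PySem.List.pyRange 0 n 1).foldl (fun st j =>
          if i ≠ j then (st.1.insert st.2 (pvKey i j), st.2 + 1) else st) st) (d, c)
      = (PySem.Dict.mk (d.items ++ PySem.List.enumerate
          (is.flatMap (fun i =>
            ((PySem.List.pyRange 0 n 1).filter (fun j => decide (i ≠ j))).map (pvKey i))) c),
         c + (is.flatMap (fun i =>
            ((PySem.List.pyRange 0 n 1).filter (fun j => decide (i ≠ j))).map (pvKey i))).length) := by
  induction is generalizing d c with
  | nil => simp [PySem.List.enumerate_nil]
  | cons i is ih =>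
    simp only [List.foldl_cons]
    rw [PySem.List.foldl_ite_eq_foldl_filter (fun j => i ≠ j)
      (fun st j => (st.1.insert st.2 (pvKey i j), st.2 + 1)) _ (d, c)]
    rw [show (List.foldl (fun st j => (st.1.insert st.2 (pvKey i j), st.2 + 1)) (d, c)
          ((PySem.List.pyRange 0 n 1).filter (fun j => decide (i ≠ j))))
        = ((PySem.List.pyRange 0 n 1).filter (fun j => decide (i ≠ j))).foldl
            (fun st x => (st.1.insert st.2 (pvKey i x), st.2 + 1)) (d, c) from rfl,
      pvCounterLoop (pvKey i) _ d c h]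
    rw [show ((PySem.List.pyRange 0 n 1).filter (fun j => decide (i ≠ j))).length
        = (((PySem.List.pyRange 0 n 1).filter (fun j => decide (i ≠ j))).map (pvKey i)).length
        from (List.length_map (pvKey i)).symm]
    set L1 := (((PySem.List.pyRange 0 n 1).filter (fun j => decide (i ≠ j))).map (pvKey i)) with hL1
    rw [ih _ _ (pvMkKeysBound d L1 c h)]
    rw [List.flatMap_cons, PySem.List.enumerate_append, List.append_assoc]
    simp only [hL1, List.length_append, Prod.mk.injEq]
    exact ⟨trivial, by push_cast; ring⟩
theorem pvA_eq (n : Int) :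
    generate_model_dict n = PySem.List.enumerate
      ((PySem.List.pyRange 0 n 1).flatMap (fun i =>
        ((PySem.List.pyRange 0 n 1).filter (fun j => decide (i ≠ j))).map (pvKey i))) 0 := by
  show ((PySem.List.pyRange 0 n 1).foldl (fun st i =>
      (PySem.List.pyRange 0 n 1).foldl (fun st j =>
        if i ≠ j then (st.1.insert st.2 (pvKey i j), st.2 + 1) else st) st)
      ((PySem.Dict.empty : PySem.Dict Int String), (0 : Int))).1.items = _
  rw [pvOuter n _ PySem.Dict.empty 0 (by simp)]
  simp [PySem.Dict.empty]

theorem pvB_eq (n : Int) (h : ¬ n < 2) :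
    generate_model_dict_alt n = (PySem.List.pyRange 0 (n * (n - 1)) 1).map (fun idx =>
      (idx, "from_" ++ PySem.Int.toStr (PySem.Int.floordiv idx (n - 1)) ++ "_to_" ++
        PySem.Int.toStr (if PySem.Int.mod idx (n - 1) < PySem.Int.floordiv idx (n - 1)
          then PySem.Int.mod idx (n - 1) else PySem.Int.mod idx (n - 1) + 1))) := by
  show (if n < 2 then ([] : List (Int × String)) else
    ((PySem.List.pyRange 0 (n * (n - 1)) 1).foldl (fun d index =>
        d.insert index ("from_" ++ PySem.Int.toStr (PySem.Int.floordiv index (n - 1)) ++ "_to_" ++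
          PySem.Int.toStr (if PySem.Int.mod index (n - 1) < PySem.Int.floordiv index (n - 1)
            then PySem.Int.mod index (n - 1) else PySem.Int.mod index (n - 1) + 1)))
      (PySem.Dict.empty : PySem.Dict Int String)).items) = _
  rw [if_neg h]
  rw [PySem.Dict.items_foldl_insert_fresh (PySem.List.pyRange 0 (n * (n - 1)) 1)
    (fun a => a)
    (fun index => "from_" ++ PySem.Int.toStr (PySem.Int.floordiv index (n - 1)) ++ "_to_" ++
          PySem.Int.toStr (if PySem.Int.mod index (n - 1) < PySem.Int.floordiv index (n - 1)
            then PySem.Int.mod index (n - 1) else PySem.Int.mod index (n - 1) + 1))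
    PySem.Dict.empty (by intro a _; simp) (by simpa using PySem.List.nodup_pyRange_one 0 (n * (n-1)))]
  simp [PySem.Dict.empty]
theorem pvMain (n : Int) : generate_model_dict n = generate_model_dict_alt n := by
  rw [pvA_eq]
  by_cases h2 : n < 2
  · have hB : generate_model_dict_alt n = [] := by
      unfold generate_model_dict_alt; simp [h2]
    rw [hB]
    by_cases h0 : n ≤ 0
    · rw [PySem.List.pyRange_one_eq_nil h0]
      simp [PySem.List.enumerate_nil]
    · have h1 : n = 1 := by omega
      subst h1; decide
  · rw [pvB_eq n h2]
    have hN : n = ((n.toNat : Int)) := by omega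
    set N := n.toNat with hNdef
    have hN2 : 2 ≤ N := by omega
    have hm : n - 1 = ((N - 1 : Nat) : Int) := by omega
    have hinner : ∀ (i : Nat),
        (((List.range N).map (fun (k : Nat) => (k : Int))).filter (fun j => decide ((i : Int) ≠ j))).map (pvKey i)
          = (pvInner N i).map (fun (t : Nat) => pvKey (i : Int) (t : Int)) := by
      intro i
      rw [List.filter_map, List.map_map]
      unfold pvInner
      rw [List.filter_congr (q := fun t => decide ¬(i = t)) (by intro t _; simp [Function.comp])]
      rfl
    have hS : ((PySem.List.pyRange 0 n 1).flatMap (fun i =>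
        ((PySem.List.pyRange 0 n 1).filter (fun j => decide (i ≠ j))).map (pvKey i)))
        = (List.range N).flatMap (fun (i : Nat) => (pvInner N i).map (fun (t : Nat) => pvKey (i : Int) (t : Int))) := by
      rw [hN, PySem.List.pyRange_zero_natCast, List.flatMap_map]
      simp only [hinner]
    rw [hS]
    have hlen : ∀ i < N, ((pvInner N i).map (fun (t : Nat) => pvKey (i : Int) (t : Int))).length = N - 1 := by
      intro i hi
      rw [List.length_map]
      exact pvInnerLen N i hi
    obtain ⟨hL, hget⟩ := pvFlatMapGet (fun (i : Nat) => (pvInner N i).map (fun (t : Nat) => pvKey (i : Int) (t : Int))) (N - 1) N hlen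
    rw [PySem.List.enumerate_eq_map_pyRange _ ""]
    have hlen2 : PySem.List.len ((List.range N).flatMap (fun (i : Nat) => (pvInner N i).map (fun (t : Nat) => pvKey (i : Int) (t : Int))))
        = n * (n - 1) := by
      simp only [PySem.List.len_eq, hL]
      push_cast [Nat.cast_sub (by omega : 1 ≤ N)]
      rw [← hN]
    rw [hlen2]
    apply List.map_congr_left
    intro idx hidx
    obtain ⟨hidx0, hidxlt⟩ := PySem.List.mem_pyRange_one.mp hidx
    have hk : idx = ((idx.toNat : Nat) : Int) := by omega
    set k := idx.toNat with hkdef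
    have hklt : k < N * (N - 1) := by
      have : (k : Int) < ((N * (N - 1) : Nat) : Int) := by
        push_cast [Nat.cast_sub (by omega : 1 ≤ N)]
        rw [← hk, ← hN]; exact hidxlt
      exact_mod_cast this
    have hm0 : 0 < N - 1 := by omega
    have hgetD : PySem.List.pyGetD ((List.range N).flatMap (fun (i : Nat) => (pvInner N i).map (fun (t : Nat) => pvKey (i : Int) (t : Int)))) idx ""
        = pvKey ↑(k / (N - 1)) ↑(if k % (N - 1) < k / (N - 1) then k % (N - 1) else k % (N - 1) + 1) := by
      rw [PySem.List.pyGetD_of_nonneg _ _ hidx0, List.getD_eq_getElem?_getD, ← hkdef,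
        hget k hklt, List.getElem?_map,
        pvInnerGet N (k / (N - 1)) (k % (N - 1)) ((Nat.div_lt_iff_lt_mul hm0).mpr hklt) (Nat.mod_lt _ hm0)]
      simp [apply_ite]
      split_ifs <;> simp
    rw [hgetD]
    have hfd : PySem.Int.floordiv idx (n - 1) = ((k / (N - 1) : Nat) : Int) := by
      rw [hk, hm, PySem.Int.floordiv_natCast]
    have hmd : PySem.Int.mod idx (n - 1) = ((k % (N - 1) : Nat) : Int) := by
      rw [hk, hm, PySem.Int.mod_natCast]
    rw [hfd, hmd]
    unfold pvKey
    rw [apply_ite (fun (x : Nat) => (x : Int))]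
    by_cases hlt : k % (N - 1) < k / (N - 1)
    · rw [if_pos hlt, if_pos (show ((k % (N - 1) : Nat) : Int) < ((k / (N - 1) : Nat) : Int) from by exact_mod_cast hlt)]
    · rw [if_neg hlt, if_neg (show ¬(((k % (N - 1) : Nat) : Int) < ((k / (N - 1) : Nat) : Int)) from by exact_mod_cast hlt)]
      push_cast
      rfl

-- ===== VERDICT (by name: the statement is the Claim_ definition above) =====
theorem generate_model_dict_spec : Claim_equal_generate_model_dict := by
  intro n _
  unfold Spec_generate_model_dict
  exact pvMain n
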